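-- pv_equiv track=rewrite | github.com/maxmelichov/RSNA-2024-Lumbar-Spine-Degenerative-Classification | model_code/data_loader.py | unpad_images_list
-- ===== SOURCE A (Python) =====
-- def unpad_images_list(images_list, max_len): # need to check this function
--     i = 0
--     while len(images_list) > max_len:
--         if i % 2 == 0:
--             images_list.pop(-1)
--         else:
--             images_list.pop(0)
--         i += 1
--     return images_list
-- ===== SOURCE B (Python) =====
-- def unpad_images_list(images_list, max_len):
--     k = len(images_list) - max_len
--     if k <= 0:
--         return images_list
--     return images_list[k // 2 : len(images_list) - (k + 1) // 2]
-- ===== Notes on version B (the rewrite author's own statement) =====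
-- stated objective: faster
-- what changed: Replaces the one-pop-at-a-time loop (each pop(0) shifts the whole list) by computing the surviving window in closed form (ceil(k/2) removed from the back, floor(k/2) from the front) and returning a single slice.
import Mathlib
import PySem

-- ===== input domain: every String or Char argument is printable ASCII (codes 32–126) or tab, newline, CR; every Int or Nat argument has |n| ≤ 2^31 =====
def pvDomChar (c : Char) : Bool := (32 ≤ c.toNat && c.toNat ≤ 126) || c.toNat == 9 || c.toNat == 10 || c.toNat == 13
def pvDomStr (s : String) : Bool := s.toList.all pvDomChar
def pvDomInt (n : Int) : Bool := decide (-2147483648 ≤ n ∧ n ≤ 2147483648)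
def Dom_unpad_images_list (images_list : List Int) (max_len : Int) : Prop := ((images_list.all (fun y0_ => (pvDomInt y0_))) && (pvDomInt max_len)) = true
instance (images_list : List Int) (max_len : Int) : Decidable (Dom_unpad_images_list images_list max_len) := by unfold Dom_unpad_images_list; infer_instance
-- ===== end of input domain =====

-- B replaces A's pop-one-element-per-iteration loop by a single closed-form slice (floor(k/2)
-- elements dropped from the front, ceil(k/2) from the back); the equivalence is about the
-- RETURN value only (A also truncates its argument list in place, which B does not).

-- ===== PORT A =====
-- while len(images_list) > max_len: pop(-1) on even i, pop(0) on odd i.  On a nonempty list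
-- pop(-1) is dropLast and pop(0) is tail; when the list is empty and the condition still holds
-- (only when max_len < 0) Python's pop raises IndexError — outside Pre_, the port returns [].
def unpadLoopA (l : List Int) (i : Nat) (max_len : Int) : List Int :=
  if (l.length : Int) > max_len then
    match l with
    | [] => []   -- Python: images_list.pop(-1) raises IndexError here (excluded by Pre_)
    | x :: xs =>
      if i % 2 == 0 then unpadLoopA (x :: xs).dropLast (i + 1) max_len
      else unpadLoopA xs (i + 1) max_len
  else l
termination_by l.length
decreasing_by
  · simp
  · simp

def unpad_images_list (images_list : List Int) (max_len : Int) : List Int :=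
  unpadLoopA images_list 0 max_len

-- ===== PORT B =====
def unpad_images_list_alt (images_list : List Int) (max_len : Int) : List Int :=
  let k : Int := (images_list.length : Int) - max_len
  if k ≤ 0 then images_list
  else PySem.List.slice images_list (some (PySem.Int.floordiv k 2))
        (some ((images_list.length : Int) - PySem.Int.floordiv (k + 1) 2))

-- ===== PRECONDITION & SPEC =====
-- Pre_ excludes max_len < 0, on which A's loop empties the list and then pop(-1) raises IndexError.
def Pre_unpad_images_list (images_list : List Int) (max_len : Int) : Prop := 0 ≤ max_len
instance (images_list : List Int) (max_len : Int) : Decidable (Pre_unpad_images_list images_list max_len) := by unfold Pre_unpad_images_list; infer_instance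
def pvWitness_unpad_images_list : List Int × Int := ([1, 2, 3, 4, 5], 2)

def Spec_unpad_images_list (images_list : List Int) (max_len : Int) (out : List Int) : Prop := out = unpad_images_list_alt images_list max_len
instance (images_list : List Int) (max_len : Int) (out : List Int) : Decidable (Spec_unpad_images_list images_list max_len out) := by unfold Spec_unpad_images_list; infer_instance

-- ===== CLAIM (what is proved, stated in full; the proofs are below) =====
def Claim_equal_unpad_images_list : Prop := ∀ (images_list : List Int) (max_len : Int), Dom_unpad_images_list images_list max_len → Pre_unpad_images_list images_list max_len → Spec_unpad_images_list images_list max_len (unpad_images_list images_list max_len)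

-- ===== LEMMAS AND PROOFS =====

-- Loop invariant: with k = len ⊖ max_len elements still to remove, the loop keeps the window
-- after f front- and b back-removals, where (f, b) split k by the parity of the counter i.
theorem unpadLoopA_eq (l : List Int) (i : Nat) (m : Int) (hm : 0 ≤ m) :
    unpadLoopA l i m =
      (l.take (l.length - (if i % 2 == 0 then ((l.length - m.toNat) + 1) / 2 else (l.length - m.toNat) / 2))).drop
        (if i % 2 == 0 then (l.length - m.toNat) / 2 else ((l.length - m.toNat) + 1) / 2) := by
  fun_induction unpadLoopA l i m with
  | case1 a b => simp
  | case2 a b c d e ih =>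
    simp only [beq_iff_eq] at d
    have e' : m.toNat ≤ c.length := by simp only [List.length_cons] at e; omega
    have h1 : ((a + 1) % 2 == 0) = false := by simp [Nat.add_mod, d]
    rw [ih]
    simp only [h1, d, beq_self_eq_true, if_true, if_false, Bool.false_eq_true,
      List.length_dropLast, List.length_cons, Nat.add_sub_cancel]
    rw [show ((b :: c).dropLast : List ℤ) = (b :: c).take c.length from by
      simp [List.dropLast_eq_take]]
    rw [List.take_take]
    rw [Nat.min_eq_left (by omega)]
    congr 2 <;> omega
  | case3 a b c d e ih =>
    simp only [beq_iff_eq] at d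
    have e' : m.toNat ≤ c.length := by simp only [List.length_cons] at e; omega
    have h1 : ((a + 1) % 2 == 0) = true := by simp [Nat.add_mod]; omega
    have h0 : (a % 2 == 0) = false := by simp; omega
    rw [ih]
    simp only [h1, h0, if_true, if_false, Bool.false_eq_true, List.length_cons]
    rw [show (c.length + 1 - m.toNat + 1) / 2 = (c.length - m.toNat) / 2 + 1 from by omega]
    rw [show (c.length + 1 - (c.length + 1 - m.toNat) / 2) =
        (c.length - (c.length - m.toNat + 1) / 2) + 1 from by omega]
    rw [List.take_succ_cons, List.drop_succ_cons]
  | case4 a b h =>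
    have : a.length - m.toNat = 0 := by omega
    simp [this]

theorem main_eq (l : List Int) (m : Int) (hm : 0 ≤ m) :
    unpad_images_list l m = unpad_images_list_alt l m := by
  rw [unpad_images_list, unpadLoopA_eq l 0 m hm]
  unfold unpad_images_list_alt
  by_cases hk : (l.length : Int) - m ≤ 0
  · have h0 : l.length - m.toNat = 0 := by omega
    simp [hk, h0]
  · simp only [hk, if_false]
    rw [PySem.Int.floordiv_eq_ediv_of_pos (by omega), PySem.Int.floordiv_eq_ediv_of_pos (by omega)]
    rw [PySem.List.slice_toNat (ha := by omega) (hb := by omega)]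
    simp only [List.drop_take, beq_self_eq_true, if_true]
    congr 1
    · omega
    · congr 1
      omega

-- ===== VERDICT (by name: the statement is the Claim_ definition above) =====
theorem unpad_images_list_spec : Claim_equal_unpad_images_list := by
  intro l m _ hpre
  unfold Spec_unpad_images_list
  exact main_eq l m hpre
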